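-- pv_equiv track=rewrite | github.com/sdj3261/Algorithm_Exercise | 단체사진찍기.py | solution
-- ===== SOURCE A (Python) =====
-- from itertools import permutations
--
-- def solution(n,data) :
--     answer = 0
--     friends = ['A', 'C', 'F', 'J', 'M', 'N', 'R', 'T']
--     for case in permutations(friends):
--         for cond in data:
--             others = abs(case.index(cond[0]) - case.index(cond[2])) - 1
--             if cond[3] == '=' and others != int(cond[4]):
--                 break
--             elif cond[3] == '>' and others <= int(cond[4]):
--                 break
--             elif cond[3] == '<' and others >= int(cond[4]):
--                 break
--         else:
--             answer += 1
--     return answer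
-- ===== SOURCE B (Python) =====
-- def solution(n, data):
--     friends = ['A', 'C', 'F', 'J', 'M', 'N', 'R', 'T']
--     cons = [(c[0], c[2], c[3], int(c[4])) for c in data if c[3] in '=<>']
--
--     def ok(a, b, op, k, pos):
--         if a in pos and b in pos:
--             gap = abs(pos[a] - pos[b]) - 1
--             if op == '=':
--                 return gap == k
--             elif op == '>':
--                 return gap > k
--             else:
--                 return gap < k
--         return True
--
--     def count(remaining, pos):
--         if not remaining:
--             return 1
--         seat = 8 - len(remaining)
--         total = 0
--         for i in range(len(remaining)):
--             f = remaining[i]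
--             pos[f] = seat
--             if all(ok(a, b, op, k, pos) for (a, b, op, k) in cons if a == f or b == f):
--                 total += count(remaining[:i] + remaining[i + 1:], pos)
--             del pos[f]
--         return total
--
--     return count(friends, {})
-- ===== Notes on version B (the rewrite author's own statement) =====
-- stated objective: alternative
-- what changed: B parses the constraint strings once and counts valid seatings by recursive backtracking over partial assignments with pruning, instead of A's generate-all-40320-permutations-then-filter with per-permutation string parsing and list.index scans.
-- outside the precondition, e.g. on solution(8, ['A~A=0', 'B']): A returns 0, B raises IndexError
import Mathlib
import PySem

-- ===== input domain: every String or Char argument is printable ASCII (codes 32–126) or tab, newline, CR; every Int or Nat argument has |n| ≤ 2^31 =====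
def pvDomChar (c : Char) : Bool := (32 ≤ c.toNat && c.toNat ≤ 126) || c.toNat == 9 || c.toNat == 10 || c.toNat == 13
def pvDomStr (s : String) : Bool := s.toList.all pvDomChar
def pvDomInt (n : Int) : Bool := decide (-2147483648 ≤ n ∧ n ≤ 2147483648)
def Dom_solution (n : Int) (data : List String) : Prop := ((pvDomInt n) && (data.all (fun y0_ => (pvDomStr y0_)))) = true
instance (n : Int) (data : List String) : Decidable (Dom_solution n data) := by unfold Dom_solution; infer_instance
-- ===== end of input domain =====

-- B replaces 'enumerate all 40320 permutations, then filter' by a recursive backtracking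
-- counter over partial seatings with a parsed-once constraint list and pruning (alternative algorithm).

-- ===== PORT A =====
-- Python friends are one-character strings; equality of one-character strings is Char equality,
-- so they are modelled as Chars (exact on the admitted ASCII inputs).
def pvFriends : List Char := ['A', 'C', 'F', 'J', 'M', 'N', 'R', 'T']

-- the inner "for cond in data: … break / else:" loop of A; false = some condition broke.
-- cond[i] → PySem.List.pyGetD on cond.toList; case.index(c) → PySem.List.index? (element present
-- under Pre_, where Python's .index returns); int(cond[4]) → PySem.Int.ofChars? (exact).
def pvLoopA (case : List Char) : List String → Bool
  | [] => true
  | cond :: rest =>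
    let cs := cond.toList
    let i : Int := ((PySem.List.index? case (PySem.List.pyGetD cs 0 ' ')).getD 0 : Nat)
    let j : Int := ((PySem.List.index? case (PySem.List.pyGetD cs 2 ' ')).getD 0 : Nat)
    let others : Int := |i - j| - 1
    if PySem.List.pyGetD cs 3 ' ' = '=' ∧ others ≠ (PySem.Int.ofChars? [PySem.List.pyGetD cs 4 ' ']).getD 0 then false
    else if PySem.List.pyGetD cs 3 ' ' = '>' ∧ others ≤ (PySem.Int.ofChars? [PySem.List.pyGetD cs 4 ' ']).getD 0 then false
    else if PySem.List.pyGetD cs 3 ' ' = '<' ∧ others ≥ (PySem.Int.ofChars? [PySem.List.pyGetD cs 4 ' ']).getD 0 then false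
    else pvLoopA case rest

def solution (n : Int) (data : List String) : Int :=
  (PySem.List.permutations pvFriends 8).foldl
    (fun answer case => if pvLoopA case data then answer + 1 else answer) 0

-- ===== PORT B =====
-- B's one-shot parse: [(c[0], c[2], c[3], int(c[4])) for c in data if c[3] in '=<>']
-- ('c[3] in "=<>"' on the single character c[3] is membership in the three characters).
def pvParse (data : List String) : List (Char × Char × Char × Int) :=
  (data.filter (fun c => PySem.List.pyGetD c.toList 3 ' ' ∈ ['=', '<', '>'])).map
    (fun c => (PySem.List.pyGetD c.toList 0 ' ', PySem.List.pyGetD c.toList 2 ' ',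
               PySem.List.pyGetD c.toList 3 ' ',
               (PySem.Int.ofChars? [PySem.List.pyGetD c.toList 4 ' ']).getD 0))

-- B's ok(a, b, op, k, pos): 'a in pos and b in pos' → Dict.contains; pos[a] → Dict.getD
-- (total form; only evaluated under the guard, exactly as in Source B); vacuously true otherwise.
def pvOK (pos : PySem.Dict Char Int) (c : Char × Char × Char × Int) : Bool :=
  if pos.contains c.1 && pos.contains c.2.1 then
    let gap : Int := |pos.getD c.1 0 - pos.getD c.2.1 0| - 1
    if c.2.2.1 = '=' then gap = c.2.2.2
    else if c.2.2.1 = '>' then gap > c.2.2.2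
    else gap < c.2.2.2
  else true

-- B's count(remaining, pos); the extra Nat argument is fuel = len(remaining) (each call erases one
-- element, so it mirrors Python's 'if not remaining: return 1'); Python's pos[f] = seat / del pos[f]
-- pair is the functional insert on the recursive call's branch (f is never in pos beforehand).
def pvCount (cons : List (Char × Char × Char × Int)) : Nat → List Char → PySem.Dict Char Int → Int
  | 0, _, _ => 1
  | m + 1, rem, pos =>
    (List.range rem.length).foldl (fun total i =>
      let f := rem.getD i ' '
      let pos' := pos.insert f (8 - (rem.length : Int))
      if cons.all (fun c => if c.1 = f || c.2.1 = f then pvOK pos' c else true)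
      then total + pvCount cons m (rem.eraseIdx i) pos'
      else total) 0

def solution_alt (n : Int) (data : List String) : Int :=
  pvCount (pvParse data) 8 pvFriends PySem.Dict.empty

-- ===== PRECONDITION & SPEC =====
-- Pre_ excludes the inputs where Python A raises (cond[0]/cond[2] not a friend → ValueError from
-- .index; cond shorter than the accessed indices → IndexError; int(cond[4]) on a non-digit →
-- ValueError), and with them the inputs where such a malformed condition is only reached for no
-- permutation because an earlier condition always breaks — there A happens to return but B,
-- which parses every condition up front, raises.
def Pre_solution (n : Int) (data : List String) : Prop :=
  ∀ s ∈ data,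
    s.toList.getD 0 ' ' ∈ pvFriends ∧ s.toList.getD 2 ' ' ∈ pvFriends ∧
    3 < s.toList.length ∧
    (s.toList.getD 3 ' ' ∈ ['=', '>', '<'] → 4 < s.toList.length ∧ (s.toList.getD 4 ' ').isDigit = true)
instance (n : Int) (data : List String) : Decidable (Pre_solution n data) := by
  unfold Pre_solution; infer_instance

def pvWitness_solution : Int × List String := (8, ["N~F=0"])

def Spec_solution (n : Int) (data : List String) (out : Int) : Prop := out = solution_alt n data
instance (n : Int) (data : List String) (out : Int) : Decidable (Spec_solution n data out) := by
  unfold Spec_solution; infer_instance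

-- ===== CLAIM (what is proved, stated in full; the proofs are below) =====
def Claim_equal_solution : Prop := ∀ (n : Int) (data : List String), Dom_solution n data → Pre_solution n data → Spec_solution n data (solution n data)

-- ===== LEMMAS AND PROOFS =====

-- A's per-condition test (the negated break chain), evaluated on a full seating list.
def pvEval (case : List Char) (c : Char × Char × Char × Int) : Bool :=
  let i : Int := ((PySem.List.index? case c.1).getD 0 : Nat)
  let j : Int := ((PySem.List.index? case c.2.1).getD 0 : Nat)
  let others : Int := |i - j| - 1
  if c.2.2.1 = '=' ∧ others ≠ c.2.2.2 then false
  else if c.2.2.1 = '>' ∧ others ≤ c.2.2.2 then false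
  else if c.2.2.1 = '<' ∧ others ≥ c.2.2.2 then false
  else true

lemma pvParse_cons (cond : String) (rest : List String) :
    pvParse (cond :: rest)
      = (if PySem.List.pyGetD cond.toList 3 ' ' ∈ (['=', '<', '>'] : List Char)
         then [(PySem.List.pyGetD cond.toList 0 ' ', PySem.List.pyGetD cond.toList 2 ' ',
                PySem.List.pyGetD cond.toList 3 ' ',
                (PySem.Int.ofChars? [PySem.List.pyGetD cond.toList 4 ' ']).getD 0)]
         else []) ++ pvParse rest := by
  by_cases h : PySem.List.pyGetD cond.toList 3 ' ' ∈ (['=', '<', '>'] : List Char)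
  · simp only [List.mem_cons, List.mem_singleton, List.not_mem_nil, or_false] at h
    rcases h with h | h | h <;> simp [pvParse, List.filter_cons, h]
  · simp only [List.mem_cons, List.mem_singleton, List.not_mem_nil, or_false] at h
    push_neg at h
    obtain ⟨h1, h2, h3⟩ := h
    simp [pvParse, List.filter_cons, h1, h2, h3]

lemma pvLoopA_cons (case : List Char) (cond : String) (rest : List String) :
    pvLoopA case (cond :: rest)
      = ((if PySem.List.pyGetD cond.toList 3 ' ' ∈ (['=', '<', '>'] : List Char)
          then pvEval case (PySem.List.pyGetD cond.toList 0 ' ', PySem.List.pyGetD cond.toList 2 ' ',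
                 PySem.List.pyGetD cond.toList 3 ' ',
                 (PySem.Int.ofChars? [PySem.List.pyGetD cond.toList 4 ' ']).getD 0)
          else true) && pvLoopA case rest) := by
  by_cases h1 : PySem.List.pyGetD cond.toList 3 ' ' = '='
  · by_cases hk : (|((PySem.List.index? case (PySem.List.pyGetD cond.toList 0 ' ')).getD 0 : Int) -
        ((PySem.List.index? case (PySem.List.pyGetD cond.toList 2 ' ')).getD 0 : Int)| - 1)
        = (PySem.Int.ofChars? [PySem.List.pyGetD cond.toList 4 ' ']).getD 0 <;>
      simp [pvLoopA, pvEval, h1, hk]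
  · by_cases h2 : PySem.List.pyGetD cond.toList 3 ' ' = '>'
    · by_cases hk : (|((PySem.List.index? case (PySem.List.pyGetD cond.toList 0 ' ')).getD 0 : Int) -
          ((PySem.List.index? case (PySem.List.pyGetD cond.toList 2 ' ')).getD 0 : Int)| - 1)
          ≤ (PySem.Int.ofChars? [PySem.List.pyGetD cond.toList 4 ' ']).getD 0 <;>
        simp [pvLoopA, pvEval, h1, h2, hk]
    · by_cases h3 : PySem.List.pyGetD cond.toList 3 ' ' = '<'
      · by_cases hk : (|((PySem.List.index? case (PySem.List.pyGetD cond.toList 0 ' ')).getD 0 : Int) -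
            ((PySem.List.index? case (PySem.List.pyGetD cond.toList 2 ' ')).getD 0 : Int)| - 1)
            ≥ (PySem.Int.ofChars? [PySem.List.pyGetD cond.toList 4 ' ']).getD 0 <;>
          simp [pvLoopA, pvEval, h1, h2, h3, hk]
      · simp [pvLoopA, pvEval, h1, h2, h3]

lemma pvLoopA_eq_all (case : List Char) (data : List String) :
    pvLoopA case data = (pvParse data).all (pvEval case) := by
  induction data with
  | nil => rfl
  | cons cond rest ih =>
    rw [pvLoopA_cons, pvParse_cons, ih]
    by_cases h : PySem.List.pyGetD cond.toList 3 ' ' ∈ (['=', '<', '>'] : List Char) <;>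
      simp [h]

-- B's pvOK agrees with A's per-condition test whenever both dictionary lookups return the
-- seat that is also the first index of that friend in the (partial or full) seating list.
lemma pvOK_eq_pvEval (case : List Char) (pos : PySem.Dict Char Int)
    (c : Char × Char × Char × Int)
    (hop : c.2.2.1 = '=' ∨ c.2.2.1 = '<' ∨ c.2.2.1 = '>')
    (ha : pos.get? c.1 = some (((PySem.List.index? case c.1).getD 0 : Nat) : Int))
    (hb : pos.get? c.2.1 = some (((PySem.List.index? case c.2.1).getD 0 : Nat) : Int)) :
    pvOK pos c = pvEval case c := by
  have hc1 : pos.contains c.1 = true := by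
    rw [PySem.Dict.contains_eq_isSome_get?, ha]; rfl
  have hc2 : pos.contains c.2.1 = true := by
    rw [PySem.Dict.contains_eq_isSome_get?, hb]; rfl
  have hgd1 : pos.getD c.1 0 = (((PySem.List.index? case c.1).getD 0 : Nat) : Int) := by
    rw [PySem.Dict.getD_eq_get?_getD, ha]; rfl
  have hgd2 : pos.getD c.2.1 0 = (((PySem.List.index? case c.2.1).getD 0 : Nat) : Int) := by
    rw [PySem.Dict.getD_eq_get?_getD, hb]; rfl
  rcases hop with h | h | h
  · by_cases hk : (|(((PySem.List.index? case c.1).getD 0 : Nat) : Int) -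
        (((PySem.List.index? case c.2.1).getD 0 : Nat) : Int)| - 1) = c.2.2.2 <;>
      simp [pvOK, pvEval, h, hc1, hc2, hgd1, hgd2, hk]
  · by_cases hk : c.2.2.2 ≤ (|(((PySem.List.index? case c.1).getD 0 : Nat) : Int) -
        (((PySem.List.index? case c.2.1).getD 0 : Nat) : Int)| - 1) <;>
    · simp [pvOK, pvEval, h, hc1, hc2, hgd1, hgd2, hk]
      rw [← decide_not, decide_eq_decide]
      rw [PySem.List.index?_eq_idxOf?, PySem.List.index?_eq_idxOf?] at hk
      omega
  · by_cases hk : (|(((PySem.List.index? case c.1).getD 0 : Nat) : Int) -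
        (((PySem.List.index? case c.2.1).getD 0 : Nat) : Int)| - 1) ≤ c.2.2.2 <;>
    · simp [pvOK, pvEval, h, hc1, hc2, hgd1, hgd2, hk]
      rw [← decide_not, decide_eq_decide]
      rw [PySem.List.index?_eq_idxOf?, PySem.List.index?_eq_idxOf?] at hk
      omega

lemma pv_foldl_if_add (l : List Nat) (p : Nat → Bool) (g : Nat → Int) (a : Int) :
    l.foldl (fun t x => if p x then t + g x else t) a
      = a + (l.map (fun x => if p x then g x else 0)).sum := by
  induction l generalizing a with
  | nil => simp
  | cons x xs ih =>
    by_cases h : p x <;> simp [h, ih, add_assoc]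

lemma pv_countP_flatMap {α β : Type} (l : List α) (f : α → List β) (p : β → Bool) :
    (((l.flatMap f).countP p : Nat) : Int) = (l.map (fun x => (((f x).countP p : Nat) : Int))).sum := by
  induction l with
  | nil => simp
  | cons x xs ih => simp [List.flatMap_cons, List.countP_append, ih]

lemma pvParse_props (data : List String)
    (hpre : ∀ s ∈ data, s.toList.getD 0 ' ' ∈ pvFriends ∧ s.toList.getD 2 ' ' ∈ pvFriends) :
    ∀ c ∈ pvParse data, c.1 ∈ pvFriends ∧ c.2.1 ∈ pvFriends ∧
      (c.2.2.1 = '=' ∨ c.2.2.1 = '<' ∨ c.2.2.1 = '>') := by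
  intro c hc
  simp only [pvParse, List.mem_map, List.mem_filter] at hc
  obtain ⟨s, ⟨hs, hof⟩, rfl⟩ := hc
  have h := hpre s hs
  exact ⟨by simpa [PySem.List.pyGetD_ofNat'] using h.1,
    by simpa [PySem.List.pyGetD_ofNat'] using h.2,
    by simpa using hof⟩

lemma pvCount_eq (data : List String)
    (hpre : ∀ s ∈ data, s.toList.getD 0 ' ' ∈ pvFriends ∧ s.toList.getD 2 ' ' ∈ pvFriends) :
    ∀ (m : Nat) (rem acc : List Char) (pos : PySem.Dict Char Int),
      rem.length = m →
      (acc ++ rem).Perm pvFriends →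
      (∀ x : Char, pos.get? x = (PySem.List.index? acc x).map (fun k => (k : Int))) →
      (∀ c ∈ pvParse data, pvOK pos c = true) →
      pvCount (pvParse data) m rem pos
        = (((PySem.List.permutations rem rem.length).countP
            (fun p => pvLoopA (acc ++ p) data) : Nat) : Int) := by
  intro m
  induction m with
  | zero =>
    intro rem acc pos hlen hperm hpos hok
    have hrem : rem = [] := List.eq_nil_of_length_eq_zero hlen
    subst hrem
    have hacc : acc.Perm pvFriends := by simpa using hperm
    have hfull : pvLoopA acc data = true := by
      rw [pvLoopA_eq_all, List.all_eq_true]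
      intro c hc
      obtain ⟨ha, hb, hop⟩ := pvParse_props data hpre c hc
      have ha' : c.1 ∈ acc := hacc.mem_iff.mpr ha
      have hb' : c.2.1 ∈ acc := hacc.mem_iff.mpr hb
      obtain ⟨ia, hia⟩ : ∃ k, PySem.List.index? acc c.1 = some k := by
        cases h : PySem.List.index? acc c.1 with
        | none => exact absurd ((PySem.List.index?_eq_none_iff _ _).mp h) (by simpa using ha')
        | some k => exact ⟨k, rfl⟩
      obtain ⟨ib, hib⟩ : ∃ k, PySem.List.index? acc c.2.1 = some k := by
        cases h : PySem.List.index? acc c.2.1 with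
        | none => exact absurd ((PySem.List.index?_eq_none_iff _ _).mp h) (by simpa using hb')
        | some k => exact ⟨k, rfl⟩
      have hxa : pos.get? c.1 = some (((PySem.List.index? acc c.1).getD 0 : Nat) : Int) := by
        rw [hpos, hia]; rfl
      have hxb : pos.get? c.2.1 = some (((PySem.List.index? acc c.2.1).getD 0 : Nat) : Int) := by
        rw [hpos, hib]; rfl
      rw [← pvOK_eq_pvEval acc pos c hop hxa hxb]
      exact hok c hc
    simp [pvCount, hfull, show PySem.List.permutations ([] : List Char) 0 = [[]] from rfl]
  | succ m ih =>
    intro rem acc pos hlen hperm hpos hok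
    have hnd : (acc ++ rem).Nodup := hperm.nodup_iff.mpr (by decide)
    have hlen8 : acc.length + rem.length = 8 := by
      have h := hperm.length_eq
      simpa using h
    -- left side: the loop body as a sum over the loop indices
    rw [show pvCount (pvParse data) (m + 1) rem pos
        = (List.range rem.length).foldl (fun total i =>
            if (pvParse data).all (fun c =>
                if c.1 = rem.getD i ' ' || c.2.1 = rem.getD i ' '
                then pvOK (pos.insert (rem.getD i ' ') (8 - (rem.length : Int))) c else true)
            then total + pvCount (pvParse data) m (rem.eraseIdx i)
                   (pos.insert (rem.getD i ' ') (8 - (rem.length : Int)))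
            else total) 0 from by simp [pvCount]]
    rw [pv_foldl_if_add (List.range rem.length) _ _ 0, zero_add]
    -- right side: one recursion step of itertools.permutations, as a sum over the same indices
    rw [show PySem.List.permutations rem rem.length = PySem.List.permutations rem (m + 1) from by
      rw [hlen]]
    rw [PySem.List.permutations, pv_countP_flatMap]
    refine congrArg List.sum (List.map_congr_left ?_)
    intro i hi
    have hi' : i < rem.length := List.mem_range.mp hi
    have hgetD : rem.getD i ' ' = rem[i] := List.getD_eq_getElem rem ' ' hi'
    have hsome : rem[i]? = some rem[i] := List.getElem?_eq_getElem hi'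
    have hfmem : rem[i] ∈ rem := List.getElem_mem hi'
    have hfacc : rem[i] ∉ acc := by
      intro hmem
      exact (List.nodup_append.mp hnd).2.2 _ hmem _ hfmem rfl
    have hseat : (8 - (rem.length : Int)) = (acc.length : Int) := by omega
    have hlen' : (rem.eraseIdx i).length = m := by
      rw [List.length_eraseIdx]
      simp only [hi', if_pos]
      omega
    have hperm' : ((acc ++ [rem[i]]) ++ rem.eraseIdx i).Perm pvFriends := by
      have h1 : (rem[i] :: rem.eraseIdx i).Perm rem := List.getElem_cons_eraseIdx_perm hi'
      have he : (acc ++ [rem[i]]) ++ rem.eraseIdx i = acc ++ (rem[i] :: rem.eraseIdx i) := by simp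
      rw [he]
      exact (List.Perm.append_left acc h1).trans hperm
    have hpos' : ∀ x : Char,
        (pos.insert (rem.getD i ' ') (8 - (rem.length : Int))).get? x
          = (PySem.List.index? (acc ++ [rem[i]]) x).map (fun k => (k : Int)) := by
      intro x
      rw [hgetD, PySem.Dict.get?_insert]
      by_cases hx : x = rem[i]
      · subst hx
        rw [if_pos rfl, PySem.List.index?_append_singleton_self acc _ hfacc]
        simp [hseat]
      · rw [if_neg hx, hpos]
        by_cases hxa : x ∈ acc
        · rw [PySem.List.index?_append_of_mem _ hxa]
        · rw [(PySem.List.index?_eq_none_iff _ _).mpr hxa,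
            (PySem.List.index?_eq_none_iff _ _).mpr (by simp [hxa, hx])]
    by_cases hchk : (pvParse data).all (fun c =>
        if c.1 = rem.getD i ' ' || c.2.1 = rem.getD i ' '
        then pvOK (pos.insert (rem.getD i ' ') (8 - (rem.length : Int))) c else true) = true
    · -- pruning check passed: the branch recurses; use the induction hypothesis
      have hok' : ∀ c ∈ pvParse data,
          pvOK (pos.insert (rem.getD i ' ') (8 - (rem.length : Int))) c = true := by
        intro c hc
        have h := List.all_eq_true.mp hchk c hc
        by_cases hinv : (c.1 = rem.getD i ' ' || c.2.1 = rem.getD i ' ') = true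
        · rwa [if_pos hinv] at h
        · have hne1 : c.1 ≠ rem.getD i ' ' := by
            simp only [Bool.or_eq_true, decide_eq_true_eq] at hinv
            exact fun hh => hinv (Or.inl hh)
          have hne2 : c.2.1 ≠ rem.getD i ' ' := by
            simp only [Bool.or_eq_true, decide_eq_true_eq] at hinv
            exact fun hh => hinv (Or.inr hh)
          have e1 : (pos.insert (rem.getD i ' ') (8 - (rem.length : Int))).get? c.1
              = pos.get? c.1 := by rw [PySem.Dict.get?_insert, if_neg hne1]
          have e2 : (pos.insert (rem.getD i ' ') (8 - (rem.length : Int))).get? c.2.1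
              = pos.get? c.2.1 := by rw [PySem.Dict.get?_insert, if_neg hne2]
          have hcont1 : (pos.insert (rem.getD i ' ') (8 - (rem.length : Int))).contains c.1
              = pos.contains c.1 := by
            rw [PySem.Dict.contains_eq_isSome_get?, PySem.Dict.contains_eq_isSome_get?, e1]
          have hcont2 : (pos.insert (rem.getD i ' ') (8 - (rem.length : Int))).contains c.2.1
              = pos.contains c.2.1 := by
            rw [PySem.Dict.contains_eq_isSome_get?, PySem.Dict.contains_eq_isSome_get?, e2]
          have hgd1 : (pos.insert (rem.getD i ' ') (8 - (rem.length : Int))).getD c.1 0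
              = pos.getD c.1 0 := by
            rw [PySem.Dict.getD_eq_get?_getD, PySem.Dict.getD_eq_get?_getD, e1]
          have hgd2 : (pos.insert (rem.getD i ' ') (8 - (rem.length : Int))).getD c.2.1 0
              = pos.getD c.2.1 0 := by
            rw [PySem.Dict.getD_eq_get?_getD, PySem.Dict.getD_eq_get?_getD, e2]
          simp only [pvOK, hcont1, hcont2, hgd1, hgd2]
          simpa only [pvOK] using hok c hc
      have hIH := ih (rem.eraseIdx i) (acc ++ [rem[i]])
        (pos.insert (rem.getD i ' ') (8 - (rem.length : Int))) hlen' hperm' hpos' hok'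
      rw [if_pos hchk, hIH, hlen']
      simp only [hsome, List.countP_map]
      have hfun : (fun p => pvLoopA (acc ++ [rem[i]] ++ p) data)
          = ((fun p => pvLoopA (acc ++ p) data) ∘ (fun p => rem[i] :: p)) := by
        funext p
        simp [Function.comp]
      rw [hfun]
    · -- pruning check failed: every completion of this partial seating violates that condition
      rw [if_neg hchk]
      obtain ⟨c, hc, hcf⟩ := List.all_eq_false.mp (Bool.eq_false_iff.mpr hchk)
      obtain ⟨-, -, hop⟩ := pvParse_props data hpre c hc
      have hcond : (c.1 = rem.getD i ' ' || c.2.1 = rem.getD i ' ') = true := by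
        by_contra hcond
        rw [if_neg hcond] at hcf
        exact hcf rfl
      rw [if_pos hcond] at hcf
      have hfail : pvOK (pos.insert (rem.getD i ' ') (8 - (rem.length : Int))) c = false :=
        Bool.eq_false_iff.mpr hcf
      have hcc : ((pos.insert (rem.getD i ' ') (8 - (rem.length : Int))).contains c.1
          && (pos.insert (rem.getD i ' ') (8 - (rem.length : Int))).contains c.2.1) = true := by
        by_contra h
        have htrue : pvOK (pos.insert (rem.getD i ' ') (8 - (rem.length : Int))) c = true := by
          simp only [pvOK]
          rw [if_neg h]
        rw [htrue] at hfail
        cases hfail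
      have hcc' := hcc
      rw [Bool.and_eq_true] at hcc'
      obtain ⟨hcon1, hcon2⟩ := hcc'
      obtain ⟨x, hx⟩ : ∃ x, (pos.insert (rem.getD i ' ') (8 - (rem.length : Int))).get? c.1
          = some x := by
        rw [PySem.Dict.contains_eq_isSome_get?] at hcon1
        exact Option.isSome_iff_exists.mp hcon1
      obtain ⟨y, hy⟩ : ∃ y, (pos.insert (rem.getD i ' ') (8 - (rem.length : Int))).get? c.2.1
          = some y := by
        rw [PySem.Dict.contains_eq_isSome_get?] at hcon2
        exact Option.isSome_iff_exists.mp hcon2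
      obtain ⟨ia, hia⟩ : ∃ k, PySem.List.index? (acc ++ [rem[i]]) c.1 = some k := by
        have h := hx; rw [hpos' c.1] at h
        cases h2 : PySem.List.index? (acc ++ [rem[i]]) c.1 with
        | none => rw [h2] at h; cases h
        | some k => exact ⟨k, rfl⟩
      obtain ⟨ib, hib⟩ : ∃ k, PySem.List.index? (acc ++ [rem[i]]) c.2.1 = some k := by
        have h := hy; rw [hpos' c.2.1] at h
        cases h2 : PySem.List.index? (acc ++ [rem[i]]) c.2.1 with
        | none => rw [h2] at h; cases h
        | some k => exact ⟨k, rfl⟩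
      have hamem : c.1 ∈ acc ++ [rem[i]] := by
        by_contra hmem
        rw [(PySem.List.index?_eq_none_iff _ _).mpr hmem] at hia; cases hia
      have hbmem : c.2.1 ∈ acc ++ [rem[i]] := by
        by_contra hmem
        rw [(PySem.List.index?_eq_none_iff _ _).mpr hmem] at hib; cases hib
      have hzero : ∀ p ∈ PySem.List.permutations (rem.eraseIdx i) m,
          pvLoopA (acc ++ rem[i] :: p) data = false := by
        intro p _
        rw [pvLoopA_eq_all]
        refine List.all_eq_false.mpr ⟨c, hc, ?_⟩
        have heq : acc ++ rem[i] :: p = (acc ++ [rem[i]]) ++ p := by simp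
        have hia' : PySem.List.index? (acc ++ rem[i] :: p) c.1 = some ia := by
          rw [heq, PySem.List.index?_append_of_mem _ hamem, hia]
        have hib' : PySem.List.index? (acc ++ rem[i] :: p) c.2.1 = some ib := by
          rw [heq, PySem.List.index?_append_of_mem _ hbmem, hib]
        have hxa : (pos.insert (rem.getD i ' ') (8 - (rem.length : Int))).get? c.1
            = some (((PySem.List.index? (acc ++ rem[i] :: p) c.1).getD 0 : Nat) : Int) := by
          rw [hpos' c.1, hia, hia']; rfl
        have hxb : (pos.insert (rem.getD i ' ') (8 - (rem.length : Int))).get? c.2.1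
            = some (((PySem.List.index? (acc ++ rem[i] :: p) c.2.1).getD 0 : Nat) : Int) := by
          rw [hpos' c.2.1, hib, hib']; rfl
        have hev : pvEval (acc ++ rem[i] :: p) c = false := by
          rw [← pvOK_eq_pvEval (acc ++ rem[i] :: p)
            (pos.insert (rem.getD i ' ') (8 - (rem.length : Int))) c hop hxa hxb]
          exact hfail
        simp [hev]
      simp only [hsome, List.countP_map]
      rw [List.countP_eq_zero.mpr (by
        intro p hp
        simp only [Function.comp]
        rw [hzero p hp]
        simp)]
      simp

-- ===== VERDICT (by name: the statement is the Claim_ definition above) =====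
theorem solution_spec : Claim_equal_solution := by
  unfold Claim_equal_solution
  intro n data hdom hpre
  unfold Spec_solution solution solution_alt
  have hpre' : ∀ s ∈ data, s.toList.getD 0 ' ' ∈ pvFriends ∧ s.toList.getD 2 ' ' ∈ pvFriends :=
    fun s hs => ⟨(hpre s hs).1, (hpre s hs).2.1⟩
  rw [PySem.List.foldl_if_add_one (fun case => pvLoopA case data) _ 0, zero_add]
  have h := pvCount_eq data hpre' 8 pvFriends [] PySem.Dict.empty rfl (by simp)
    (fun x => by rfl) (fun c hc => by rfl)
  simp only [List.nil_append] at h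
  rw [show pvFriends.length = 8 from rfl] at h
  exact h.symm
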